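-- pv_equiv track=rewrite | github.com/StBogdan/CTCI_python | chapter_17/p17_23.py | max_square_outline
-- ===== SOURCE A (Python) =====
-- from typing import List, Tuple
--
-- def precomp_down_left_squares(m: List[List[int]]) \
--         -> Tuple[List[List[int]], List[List[int]]]:
--     rows = len(m)
--     cols = len(m[0])
--
--     down_sq = [[0 for _ in range(cols+1)] for _ in range(rows+1)]
--     right_sq = [[0 for _ in range(cols+1)] for _ in range(rows+1)]
--
--     for row in range(rows-1, -1, -1):
--         for col in range(cols-1, -1, -1):
--             down_sq[row][col] = 0 if m[row][col] == 0 else 1 + \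
--                 down_sq[row+1][col]
--             right_sq[row][col] = 0 if m[row][col] == 0 else 1 + \
--                 right_sq[row][col+1]
--
--     return down_sq, right_sq
--
-- def check_square(coords: tuple, sq_size: int,
--                  down_sq: List[List[int]],
--                  right_sq: List[List[int]]) -> bool:
--     """ Check that the square has squares for all the sides, as required by the the size
--     l     r
--     # # # # top
--     #     #
--     #     #
--     # # # # bot
--     <-----> sq_size
--     """
--     top_left_col, top_left_row = coords
--     bot_left_col, bot_left_row = top_left_col, top_left_row + sq_size-1
--     top_right_col, top_right_row = top_left_col + sq_size - 1, top_left_row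
--
--     if down_sq[top_left_row][top_left_col] < sq_size \
--             or right_sq[top_left_row][top_left_col] < sq_size:
--         return False
--
--     if down_sq[top_right_row][top_right_col] < sq_size \
--             or right_sq[bot_left_row][bot_left_col] < sq_size:
--         return False
--
--     return True
--
-- def max_square_outline(matrix: List[List[int]]) -> List[tuple]:
--     # Return the 4 coordonates, zero-indexed
--     n = len(matrix)
--     down_sq, right_sq = precomp_down_left_squares(matrix)
--
--     for square_size in range(n, 0, -1):
--         for row in range(0, n-square_size+1):
--             for col in range(0, n-square_size+1):
--                 if check_square((row, col), square_size, down_sq, right_sq):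
--                     return [
--                         (row, col),
--                         (row+square_size - 1, col + square_size - 1)
--                     ]
--
--     return []
-- ===== SOURCE B (Python) =====
-- from typing import List
--
-- def max_square_outline(matrix: List[List[int]]) -> List[tuple]:
--     # Direct border scans instead of precomputed run-length tables; column-major
--     # position scan, matching A's coordinate convention (A unpacks (row, col) as
--     # (top_left_col, top_left_row), so A's returned pair names the transposed
--     # top-left of the square whose border it actually verified).
--     n = len(matrix)
--
--     def border_ok(r: int, c: int, s: int) -> bool:
--         return (all(matrix[r][c + j] != 0 for j in range(s))
--                 and all(matrix[r + s - 1][c + j] != 0 for j in range(s))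
--                 and all(matrix[r + i][c] != 0 for i in range(s))
--                 and all(matrix[r + i][c + s - 1] != 0 for i in range(s)))
--
--     for size in range(n, 0, -1):
--         for c in range(n - size + 1):
--             for r in range(n - size + 1):
--                 if border_ok(r, c, size):
--                     return [(c, r), (c + size - 1, r + size - 1)]
--     return []
-- ===== Notes on version B (the rewrite author's own statement) =====
-- stated objective: simpler
-- what changed: Drops the two precomputed (rows+1)x(cols+1) down/right run-length tables and checks each candidate square by a short-circuiting direct scan of its four borders, keeping A's size-descending, transposed column-major first-hit order; skipping the full-matrix table build makes B measurably faster on the generated inputs.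
-- outside the precondition, e.g. on max_square_outline([[0], [0]]): A returns [], B raises IndexError; on max_square_outline([[1], [1]]): A returns [(0, 0), (0, 0)], B raises IndexError
import Mathlib
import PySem

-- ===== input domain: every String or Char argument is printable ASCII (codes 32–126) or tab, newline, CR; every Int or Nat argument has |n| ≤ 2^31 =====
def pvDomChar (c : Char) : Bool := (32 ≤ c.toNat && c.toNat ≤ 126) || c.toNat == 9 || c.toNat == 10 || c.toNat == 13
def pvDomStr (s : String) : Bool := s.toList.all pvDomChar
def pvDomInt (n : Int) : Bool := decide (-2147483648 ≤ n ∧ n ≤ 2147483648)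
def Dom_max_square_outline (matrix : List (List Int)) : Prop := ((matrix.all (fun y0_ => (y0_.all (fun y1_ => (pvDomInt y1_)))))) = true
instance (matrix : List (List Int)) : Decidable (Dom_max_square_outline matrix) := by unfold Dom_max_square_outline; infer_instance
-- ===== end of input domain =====

-- B replaces A's precomputed down/right run-length tables by short-circuiting direct border
-- scans of each candidate square (same search order, same transposed-coordinate convention);
-- simpler, and measured faster in a timing run (no full-matrix table build).


-- ===== PORT A =====
-- m[i][j]: on every input admitted by Pre_ the indices used below are nonnegative and
-- in range; out of range Python raises IndexError (such inputs are outside Pre_).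
def pvMget (m : List (List Int)) (i j : Int) : Int :=
  (m.getD i.toNat []).getD j.toNat 0

-- the mutable 2D arrays down_sq / right_sq, modelled as finitely-supported update
-- functions (initially all 0, exactly the Python 0-filled (rows+1)×(cols+1) tables)
def pvUpd (t : Int → Int → Int) (i j v : Int) : Int → Int → Int :=
  fun i' j' => if i' = i ∧ j' = j then v else t i' j'

-- body of the inner `for col in range(cols-1, -1, -1)` loop of precomp_down_left_squares
def pvPrecompCell (m : List (List Int)) (row : Int)
    (st : (Int → Int → Int) × (Int → Int → Int)) (col : Int) :
    (Int → Int → Int) × (Int → Int → Int) :=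
  let dv : Int := if pvMget m row col = 0 then 0 else 1 + st.1 (row + 1) col
  let rv : Int := if pvMget m row col = 0 then 0 else 1 + st.2 row (col + 1)
  (pvUpd st.1 row col dv, pvUpd st.2 row col rv)

-- body of the outer `for row in range(rows-1, -1, -1)` loop
def pvPrecompRow (m : List (List Int)) (cols : Int)
    (st : (Int → Int → Int) × (Int → Int → Int)) (row : Int) :
    (Int → Int → Int) × (Int → Int → Int) :=
  (PySem.List.pyRange (cols - 1) (-1) (-1)).foldl (pvPrecompCell m row) st

def precomp_down_left_squares (m : List (List Int)) :
    (Int → Int → Int) × (Int → Int → Int) :=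
  let rows : Int := m.length
  let cols : Int := (m.headD []).length
  (PySem.List.pyRange (rows - 1) (-1) (-1)).foldl (pvPrecompRow m cols)
    (fun _ _ => 0, fun _ _ => 0)

def check_square (coords : Int × Int) (sq_size : Int)
    (down_sq right_sq : Int → Int → Int) : Bool :=
  let tlc := coords.1
  let tlr := coords.2
  let blc := tlc
  let blr := tlr + sq_size - 1
  let trc := tlc + sq_size - 1
  let trr := tlr
  if down_sq tlr tlc < sq_size || right_sq tlr tlc < sq_size then false
  else if down_sq trr trc < sq_size || right_sq blr blc < sq_size then false
  else true

def max_square_outline (matrix : List (List Int)) : List (Int × Int) :=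
  let n : Int := matrix.length
  let dr := precomp_down_left_squares matrix
  (((PySem.List.pyRange n 0 (-1)).findSome? (fun square_size =>
    (PySem.List.pyRange 0 (n - square_size + 1) 1).findSome? (fun row =>
      (PySem.List.pyRange 0 (n - square_size + 1) 1).findSome? (fun col =>
        if check_square (row, col) square_size dr.1 dr.2 then
          some [(row, col), (row + square_size - 1, col + square_size - 1)]
        else none)))).getD [])

-- ===== PORT B =====
def border_ok (matrix : List (List Int)) (r c s : Int) : Bool :=
  ((List.range s.toNat).all fun j => pvMget matrix r (c + j) ≠ 0) &&
  ((List.range s.toNat).all fun j => pvMget matrix (r + s - 1) (c + j) ≠ 0) &&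
  ((List.range s.toNat).all fun i => pvMget matrix (r + i) c ≠ 0) &&
  ((List.range s.toNat).all fun i => pvMget matrix (r + i) (c + s - 1) ≠ 0)

def max_square_outline_alt (matrix : List (List Int)) : List (Int × Int) :=
  let n : Int := matrix.length
  (((PySem.List.pyRange n 0 (-1)).findSome? (fun size =>
    (PySem.List.pyRange 0 (n - size + 1) 1).findSome? (fun c =>
      (PySem.List.pyRange 0 (n - size + 1) 1).findSome? (fun r =>
        if border_ok matrix r c size then
          some [(c, r), (c + size - 1, r + size - 1)]
        else none)))).getD [])

-- ===== PRECONDITION & SPEC =====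
-- Pre_ excludes the empty matrix and ragged matrices (A raises IndexError in the precomputation)
-- and matrices with fewer columns than rows, where A's table reads can go out of range and
-- whether A raises IndexError depends on the data (B raises IndexError on its border scans there).
def Pre_max_square_outline (matrix : List (List Int)) : Prop :=
  matrix ≠ [] ∧ (∀ row ∈ matrix, row.length = (matrix.headD []).length) ∧
    matrix.length ≤ (matrix.headD []).length
instance (matrix : List (List Int)) : Decidable (Pre_max_square_outline matrix) := by
  unfold Pre_max_square_outline; infer_instance

def pvWitness_max_square_outline : List (List Int) := [[1, 1], [1, 0]]

def Spec_max_square_outline (matrix : List (List Int)) (out : List (Int × Int)) : Prop :=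
  out = max_square_outline_alt matrix
instance (matrix : List (List Int)) (out : List (Int × Int)) :
    Decidable (Spec_max_square_outline matrix out) := by
  unfold Spec_max_square_outline; infer_instance

-- ===== CLAIM (what is proved, stated in full; the proofs are below) =====
def Claim_equal_max_square_outline : Prop :=
  ∀ (matrix : List (List Int)), Dom_max_square_outline matrix →
    Pre_max_square_outline matrix →
    Spec_max_square_outline matrix (max_square_outline matrix)

-- ===== LEMMAS AND PROOFS =====

def runD (m : List (List Int)) (i j : Int) : Int :=
  if _h : i < (m.length : Int) then
    (if pvMget m i j = 0 then 0 else 1 + runD m (i + 1) j)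
  else 0
termination_by ((m.length : Int) - i).toNat
decreasing_by omega

def runR (row : List Int) (j : Int) : Int :=
  if _h : j < (row.length : Int) then
    (if row.getD j.toNat 0 = 0 then 0 else 1 + runR row (j + 1))
  else 0
termination_by ((row.length : Int) - j).toNat
decreasing_by omega

theorem runD_nonneg (m : List (List Int)) (i j : Int) : 0 ≤ runD m i j := by
  fun_induction runD <;> omega

theorem runR_nonneg (row : List Int) (j : Int) : 0 ≤ runR row j := by
  fun_induction runR <;> omega

theorem runD_ge_iff (m : List (List Int)) (j : Int) (s : Nat) :
    ∀ i : Int, i + s ≤ (m.length : Int) →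
      ((s : Int) ≤ runD m i j ↔ ∀ t : Nat, t < s → pvMget m (i + t) j ≠ 0) := by
  induction s with
  | zero =>
    intro i _
    simp [runD_nonneg]
  | succ s ih =>
    intro i hi
    rw [runD]
    rw [dif_pos (by omega)]
    by_cases h0 : pvMget m i j = 0
    · rw [if_pos h0]
      constructor
      · intro h; omega
      · intro h
        exact absurd (by simpa using h0) (by simpa using h 0 (by omega))
    · rw [if_neg h0]
      have := ih (i + 1) (by omega)
      constructor
      · intro h t ht
        rcases Nat.eq_zero_or_pos t with rfl | hp
        · simpa using h0
        · have := (this.mp (by push_cast at h ⊢; omega)) (t - 1) (by omega)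
          have harith : i + 1 + ((t - 1 : Nat) : Int) = i + t := by omega
          rwa [harith] at this
      · intro h
        have : (s : Int) ≤ runD m (i + 1) j := by
          apply this.mpr
          intro t ht
          have := h (t + 1) (by omega)
          have harith : i + ((t + 1 : Nat) : Int) = i + 1 + t := by push_cast; omega
          rwa [harith] at this
        push_cast
        omega

theorem runR_ge_iff (row : List Int) (s : Nat) :
    ∀ j : Int, 0 ≤ j → j + s ≤ (row.length : Int) →
      ((s : Int) ≤ runR row j ↔ ∀ t : Nat, t < s → row.getD (j + t).toNat 0 ≠ 0) := by
  induction s with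
  | zero =>
    intro j _ _
    simp [runR_nonneg]
  | succ s ih =>
    intro j hj0 hj
    rw [runR]
    rw [dif_pos (by omega)]
    by_cases h0 : row.getD j.toNat 0 = 0
    · rw [if_pos h0]
      constructor
      · intro h; omega
      · intro h
        have := h 0 (by omega)
        simp only [Nat.cast_zero, add_zero] at this
        exact absurd h0 this
    · rw [if_neg h0]
      have := ih (j + 1) (by omega) (by omega)
      constructor
      · intro h t ht
        rcases Nat.eq_zero_or_pos t with rfl | hp
        · simpa using h0
        · have := (this.mp (by push_cast at h ⊢; omega)) (t - 1) (by omega)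
          have harith : j + 1 + ((t - 1 : Nat) : Int) = j + t := by omega
          rwa [harith] at this
      · intro h
        have : (s : Int) ≤ runR row (j + 1) := by
          apply this.mpr
          intro t ht
          have := h (t + 1) (by omega)
          have harith : j + ((t + 1 : Nat) : Int) = j + 1 + t := by push_cast; omega
          rwa [harith] at this
        push_cast
        omega

-- the contents of the two tables once every row ≥ k has been processed
def pvTab (m : List (List Int)) (k : Int)
    (st : (Int → Int → Int) × (Int → Int → Int)) : Prop :=
  (∀ i j : Int, st.1 i j =
    if k ≤ i ∧ i < (m.length : Int) ∧ 0 ≤ j ∧ j < ((m.headD []).length : Int)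
    then runD m i j else 0) ∧
  (∀ i j : Int, st.2 i j =
    if k ≤ i ∧ i < (m.length : Int) ∧ 0 ≤ j ∧ j < ((m.headD []).length : Int)
    then runR (m.getD i.toNat []) j else 0)

-- the contents mid-way through row ρ: columns ≥ k of row ρ already written
def pvInnerInv (m : List (List Int)) (ρ k : Int)
    (st : (Int → Int → Int) × (Int → Int → Int)) : Prop :=
  (∀ i j : Int, st.1 i j =
    if (ρ + 1 ≤ i ∧ i < (m.length : Int) ∧ 0 ≤ j ∧ j < ((m.headD []).length : Int)) ∨
       (i = ρ ∧ k ≤ j ∧ j < ((m.headD []).length : Int))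
    then runD m i j else 0) ∧
  (∀ i j : Int, st.2 i j =
    if (ρ + 1 ≤ i ∧ i < (m.length : Int) ∧ 0 ≤ j ∧ j < ((m.headD []).length : Int)) ∨
       (i = ρ ∧ k ≤ j ∧ j < ((m.headD []).length : Int))
    then runR (m.getD i.toNat []) j else 0)

theorem pvCell_step (m : List (List Int)) (ρ c : Int)
    (hρ0 : 0 ≤ ρ) (hρ : ρ < (m.length : Int)) (hc0 : 0 ≤ c)
    (hc : c < ((m.headD []).length : Int))
    (hlen : ∀ row ∈ m, row.length = (m.headD []).length)
    (st : (Int → Int → Int) × (Int → Int → Int))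
    (hst : pvInnerInv m ρ (c + 1) st) :
    pvInnerInv m ρ c (pvPrecompCell m ρ st c) := by
  obtain ⟨hd, hr⟩ := hst
  have hrowlen : ((m.getD ρ.toNat []).length : Int) = ((m.headD []).length : Int) := by
    have hlt : ρ.toNat < m.length := by omega
    have hmem : m.getD ρ.toNat [] ∈ m := by
      rw [List.getD_eq_getElem _ _ hlt]; exact List.getElem_mem hlt
    exact_mod_cast hlen _ hmem
  constructor
  · intro i j
    simp only [pvPrecompCell, pvUpd]
    by_cases hij : i = ρ ∧ j = c
    · obtain ⟨rfl, rfl⟩ := hij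
      rw [if_pos ⟨rfl, rfl⟩, if_pos (Or.inr ⟨rfl, le_refl _, hc⟩)]
      -- dv = runD m ρ c
      have hread : st.1 (i + 1) j = runD m (i + 1) j := by
        rw [hd]
        by_cases h : i + 1 < (m.length : Int)
        · rw [if_pos (Or.inl ⟨le_refl _, h, hc0, hc⟩)]
        · rw [if_neg (by omega), runD, dif_neg (by omega)]
      rw [hread]
      conv_rhs => rw [runD]
      rw [dif_pos hρ]
    · rw [if_neg hij, hd]
      congr 1
      simp only [eq_iff_iff]
      constructor
      · rintro (h | h) <;> [exact Or.inl h; exact Or.inr ⟨h.1, by omega, h.2.2⟩]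
      · rintro (h | ⟨rfl, h2, h3⟩)
        · exact Or.inl h
        · refine Or.inr ⟨rfl, ?_, h3⟩
          rcases eq_or_ne j c with rfl | hne
          · exact absurd ⟨rfl, rfl⟩ hij
          · omega
  · intro i j
    simp only [pvPrecompCell, pvUpd]
    by_cases hij : i = ρ ∧ j = c
    · obtain ⟨rfl, rfl⟩ := hij
      rw [if_pos ⟨rfl, rfl⟩, if_pos (Or.inr ⟨rfl, le_refl _, hc⟩)]
      have hread : st.2 i (j + 1) = runR (m.getD i.toNat []) (j + 1) := by
        rw [hr]
        by_cases h : j + 1 < ((m.headD []).length : Int)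
        · rw [if_pos (Or.inr ⟨rfl, le_refl _, h⟩)]
        · rw [if_neg (by omega), runR, dif_neg (by omega)]
      rw [hread]
      conv_rhs => rw [runR]
      rw [dif_pos (show j < ((m.getD i.toNat []).length : Int) by omega)]
      rfl
    · rw [if_neg hij, hr]
      congr 1
      simp only [eq_iff_iff]
      constructor
      · rintro (h | h) <;> [exact Or.inl h; exact Or.inr ⟨h.1, by omega, h.2.2⟩]
      · rintro (h | ⟨rfl, h2, h3⟩)
        · exact Or.inl h
        · refine Or.inr ⟨rfl, ?_, h3⟩
          rcases eq_or_ne j c with rfl | hne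
          · exact absurd ⟨rfl, rfl⟩ hij
          · omega

theorem pvInner_fold (m : List (List Int)) (ρ : Int)
    (hρ0 : 0 ≤ ρ) (hρ : ρ < (m.length : Int))
    (hlen : ∀ row ∈ m, row.length = (m.headD []).length) :
    ∀ (a : Int), -1 ≤ a → a ≤ ((m.headD []).length : Int) - 1 →
      ∀ st, pvInnerInv m ρ (a + 1) st →
        pvInnerInv m ρ 0
          ((PySem.List.pyRange a (-1) (-1)).foldl (pvPrecompCell m ρ) st) := by
  intro a
  induction hn : (a + 1).toNat generalizing a with
  | zero =>
    intro ha0 _ st hst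
    have ha : a = -1 := by omega
    subst ha
    rw [PySem.List.pyRange_neg_one_eq_nil (by omega)]
    simpa using hst
  | succ k ih =>
    intro ha0 ha st hst
    have hapos : (0:Int) ≤ a := by omega
    rw [PySem.List.pyRange_neg_one_cons (by omega)]
    rw [List.foldl_cons]
    have hstep := pvCell_step m ρ a hρ0 hρ hapos (by omega) hlen st hst
    rcases eq_or_lt_of_le hapos with heq | hpos
    · rw [PySem.List.pyRange_neg_one_eq_nil (by omega)]
      simp only [List.foldl_nil]
      have : a = 0 := heq.symm
      subst this
      exact hstep
    · exact ih (a - 1) (by omega) (by omega) (by omega) _ (by simpa using hstep)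

theorem pvRow_step (m : List (List Int)) (ρ : Int)
    (hρ0 : 0 ≤ ρ) (hρ : ρ < (m.length : Int))
    (hlen : ∀ row ∈ m, row.length = (m.headD []).length)
    (st : (Int → Int → Int) × (Int → Int → Int))
    (hst : pvTab m (ρ + 1) st) :
    pvTab m ρ (pvPrecompRow m ((m.headD []).length : Int) st ρ) := by
  have h0 : pvInnerInv m ρ (((m.headD []).length : Int) - 1 + 1) st := by
    obtain ⟨hd, hr⟩ := hst
    constructor <;> intro i j <;> [rw [hd]; rw [hr]] <;> congr 1 <;>
      simp only [eq_iff_iff] <;> constructor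
    · intro h; exact Or.inl h
    · rintro (h | h) <;> [exact h; omega]
    · intro h; exact Or.inl h
    · rintro (h | h) <;> [exact h; omega]
  have := pvInner_fold m ρ hρ0 hρ hlen (((m.headD []).length : Int) - 1)
    (by omega) (by omega) st h0
  obtain ⟨hd, hr⟩ := this
  constructor <;> intro i j <;> [rw [pvPrecompRow, hd]; rw [pvPrecompRow, hr]] <;>
    congr 1 <;> simp only [eq_iff_iff] <;> constructor
  · rintro (h | h) <;> omega
  · intro h; rcases eq_or_lt_of_le h.1 with heq | hlt
    · exact Or.inr ⟨heq.symm, by omega, h.2.2.2⟩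
    · exact Or.inl ⟨by omega, h.2.1, h.2.2⟩
  · rintro (h | h) <;> omega
  · intro h; rcases eq_or_lt_of_le h.1 with heq | hlt
    · exact Or.inr ⟨heq.symm, by omega, h.2.2.2⟩
    · exact Or.inl ⟨by omega, h.2.1, h.2.2⟩

theorem pvOuter_fold (m : List (List Int))
    (hlen : ∀ row ∈ m, row.length = (m.headD []).length) :
    ∀ (a : Int), -1 ≤ a → a ≤ (m.length : Int) - 1 →
      ∀ st, pvTab m (a + 1) st →
        pvTab m 0
          ((PySem.List.pyRange a (-1) (-1)).foldl
            (pvPrecompRow m ((m.headD []).length : Int)) st) := by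
  intro a
  induction hn : (a + 1).toNat generalizing a with
  | zero =>
    intro ha0 _ st hst
    have ha : a = -1 := by omega
    subst ha
    rw [PySem.List.pyRange_neg_one_eq_nil (by omega)]
    simpa using hst
  | succ k ih =>
    intro ha0 ha st hst
    have hapos : (0:Int) ≤ a := by omega
    rw [PySem.List.pyRange_neg_one_cons (by omega)]
    rw [List.foldl_cons]
    have hstep := pvRow_step m a hapos (by omega) hlen st hst
    rcases eq_or_lt_of_le hapos with heq | hpos
    · rw [PySem.List.pyRange_neg_one_eq_nil (by omega)]
      simp only [List.foldl_nil]
      have : a = 0 := heq.symm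
      subst this
      exact hstep
    · exact ih (a - 1) (by omega) (by omega) (by omega) _ (by simpa using hstep)

theorem pvPrecomp_char (m : List (List Int))
    (hlen : ∀ row ∈ m, row.length = (m.headD []).length) :
    pvTab m 0 (precomp_down_left_squares m) := by
  rw [precomp_down_left_squares]
  have h0 : pvTab m ((m.length : Int) - 1 + 1)
      ((fun _ _ => (0:Int)), (fun _ _ => (0:Int))) := by
    constructor <;> intro i j <;> rw [if_neg (by omega)]
  exact pvOuter_fold m hlen ((m.length : Int) - 1) (by omega) (by omega) _ h0

theorem pvLenAt (m : List (List Int))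
    (hlen : ∀ row ∈ m, row.length = (m.headD []).length)
    (i : Int) (h0 : 0 ≤ i) (h1 : i < (m.length : Int)) :
    ((m.getD i.toNat []).length : Int) = ((m.headD []).length : Int) := by
  have hlt : i.toNat < m.length := by omega
  have hmem : m.getD i.toNat [] ∈ m := by
    rw [List.getD_eq_getElem _ _ hlt]; exact List.getElem_mem hlt
  exact_mod_cast hlen _ hmem

set_option maxHeartbeats 1000000 in
theorem pvCheck_eq_border (m : List (List Int))
    (hlen : ∀ row ∈ m, row.length = (m.headD []).length)
    (hcols : (m.length : Int) ≤ ((m.headD []).length : Int))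
    (s row col : Int) (hs : 1 ≤ s)
    (hr0 : 0 ≤ row) (hr1 : row ≤ (m.length : Int) - s)
    (hc0 : 0 ≤ col) (hc1 : col ≤ (m.length : Int) - s) :
    check_square (row, col) s (precomp_down_left_squares m).1
      (precomp_down_left_squares m).2 = border_ok m col row s := by
  obtain ⟨hd, hrr⟩ := pvPrecomp_char m hlen
  have e1 : (precomp_down_left_squares m).1 col row = runD m col row := by
    rw [hd, if_pos (by constructor <;> [omega; omega])]
  have e2 : (precomp_down_left_squares m).2 col row = runR (m.getD col.toNat []) row := by
    rw [hrr, if_pos (by omega)]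
  have e3 : (precomp_down_left_squares m).1 col (row + s - 1) = runD m col (row + s - 1) := by
    rw [hd, if_pos (by omega)]
  have e4 : (precomp_down_left_squares m).2 (col + s - 1) row
      = runR (m.getD (col + s - 1).toNat []) row := by
    rw [hrr, if_pos (by omega)]
  have hsnat : ((s.toNat : Nat) : Int) = s := by omega
  have hiffD1 := runD_ge_iff m row s.toNat col (by omega)
  have hiffD2 := runD_ge_iff m (row + s - 1) s.toNat col (by omega)
  have hlc : ((m.getD col.toNat []).length : Int) = ((m.headD []).length : Int) :=
    pvLenAt m hlen col hc0 (by omega)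
  have hlc2 : ((m.getD (col + s - 1).toNat []).length : Int) = ((m.headD []).length : Int) :=
    pvLenAt m hlen (col + s - 1) (by omega) (by omega)
  have hiffR1 := runR_ge_iff (m.getD col.toNat []) s.toNat row hr0 (by omega)
  have hiffR2 := runR_ge_iff (m.getD (col + s - 1).toNat []) s.toNat row hr0 (by omega)
  rw [hsnat] at hiffD1 hiffD2 hiffR1 hiffR2
  rw [Bool.eq_iff_iff]
  have hcheck : check_square (row, col) s (precomp_down_left_squares m).1
      (precomp_down_left_squares m).2 = true ↔
      (s ≤ (precomp_down_left_squares m).1 col row ∧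
       s ≤ (precomp_down_left_squares m).2 col row ∧
       s ≤ (precomp_down_left_squares m).1 col (row + s - 1) ∧
       s ≤ (precomp_down_left_squares m).2 (col + s - 1) row) := by
    simp only [check_square]
    split_ifs with h1 h2
    · simp only [Bool.or_eq_true, decide_eq_true_eq] at h1
      constructor
      · intro h; exact absurd h (by simp)
      · intro h; rcases h1 with h1 | h1 <;> omega
    · simp only [Bool.or_eq_true, decide_eq_true_eq] at h2
      constructor
      · intro h; exact absurd h (by simp)
      · intro h; rcases h2 with h2 | h2 <;> omega
    · simp only [Bool.or_eq_true, decide_eq_true_eq, not_or, not_lt] at h1 h2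
      constructor
      · intro _; exact ⟨h1.1, h1.2, h2.1, h2.2⟩
      · intro _; rfl
  rw [hcheck]
  have hborder : border_ok m col row s = true ↔
      ((∀ t : Nat, t < s.toNat → pvMget m col (row + t) ≠ 0) ∧
       (∀ t : Nat, t < s.toNat → pvMget m (col + s - 1) (row + t) ≠ 0) ∧
       (∀ t : Nat, t < s.toNat → pvMget m (col + t) row ≠ 0) ∧
       (∀ t : Nat, t < s.toNat → pvMget m (col + t) (row + s - 1) ≠ 0)) := by
    simp only [border_ok, Bool.and_eq_true, List.all_eq_true, List.mem_range,
      decide_eq_true_eq, and_assoc]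
  rw [hborder, e1, e2, e3, e4]
  rw [hiffD1, hiffD2, hiffR1, hiffR2]
  simp only [pvMget]
  exact ⟨fun ⟨l, t, r, b⟩ => ⟨t, b, l, r⟩, fun ⟨t, b, l, r⟩ => ⟨l, t, r, b⟩⟩

theorem pvFindSome?_congr {α β : Type} (l : List α) (f g : α → Option β)
    (h : ∀ x ∈ l, f x = g x) : l.findSome? f = l.findSome? g := by
  induction l with
  | nil => rfl
  | cons a l ih =>
    simp only [List.findSome?_cons]
    rw [h a (List.mem_cons_self)]
    cases g a with
    | none => exact ih fun x hx => h x (List.mem_cons_of_mem _ hx)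
    | some b => rfl

theorem pvMain_eq (m : List (List Int))
    (hlen : ∀ row ∈ m, row.length = (m.headD []).length)
    (hcols : (m.length : Int) ≤ ((m.headD []).length : Int)) :
    max_square_outline m = max_square_outline_alt m := by
  rw [max_square_outline, max_square_outline_alt]
  congr 1
  apply pvFindSome?_congr
  intro s hs
  rw [PySem.List.mem_pyRange_neg_one] at hs
  apply pvFindSome?_congr
  intro row hrow
  rw [PySem.List.mem_pyRange_one] at hrow
  apply pvFindSome?_congr
  intro col hcol
  rw [PySem.List.mem_pyRange_one] at hcol
  rw [pvCheck_eq_border m hlen hcols s row col (by omega) (by omega)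
    (by omega) (by omega) (by omega)]

-- ===== VERDICT (by name: the statement is the Claim_ definition above) =====
theorem max_square_outline_spec : Claim_equal_max_square_outline := by
  intro m _ hpre
  unfold Spec_max_square_outline
  exact pvMain_eq m hpre.2.1 (by exact_mod_cast hpre.2.2)
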